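-- pv_equiv track=rewrite | github.com/walkccc/LeetCode | solutions/2397. Maximum Rows Covered by Columns/2397.py | _getAllZerosRowCount
-- ===== SOURCE A (Python) =====
-- from typing import List
--
-- def _getAllZerosRowCount(matrix: List[List[int]], mask: int) -> int:
--   count = 0
--   for row in matrix:
--     isAllZeros = True
--     for i, cell in enumerate(row):
--       if cell == 1 and (mask >> i & 1) == 0:
--         isAllZeros = False
--         break
--     if isAllZeros:
--       count += 1
--   return count
-- ===== SOURCE B (Python) =====
-- from typing import List
--
-- def _getAllZerosRowCount(matrix: List[List[int]], mask: int) -> int: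
--   width = max(map(len, matrix), default=0)
--   uncovered = [j for j in range(width) if not (mask >> j) & 1]
--   return sum(all(j >= len(row) or row[j] != 1 for j in uncovered)
--              for row in matrix)
-- ===== Notes on version B (the rewrite author's own statement) =====
-- stated objective: alternative
-- what changed: Instead of scanning every cell of every row with a boolean flag and early break, B precomputes once the list of column indices the mask leaves uncovered and counts rows by indexing only those columns, so the per-row work is over uncovered columns rather than over all cells.
import Mathlib
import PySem

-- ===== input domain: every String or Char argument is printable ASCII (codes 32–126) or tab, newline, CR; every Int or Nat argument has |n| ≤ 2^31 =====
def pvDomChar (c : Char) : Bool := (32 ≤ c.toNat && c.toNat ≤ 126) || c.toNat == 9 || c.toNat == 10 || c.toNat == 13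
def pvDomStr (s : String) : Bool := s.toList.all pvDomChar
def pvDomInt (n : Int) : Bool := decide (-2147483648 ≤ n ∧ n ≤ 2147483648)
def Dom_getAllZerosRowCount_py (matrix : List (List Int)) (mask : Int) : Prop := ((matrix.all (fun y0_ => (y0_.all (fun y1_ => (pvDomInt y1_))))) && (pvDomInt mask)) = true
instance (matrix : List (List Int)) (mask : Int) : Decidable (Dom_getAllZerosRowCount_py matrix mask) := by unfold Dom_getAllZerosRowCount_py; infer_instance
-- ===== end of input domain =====

-- B inverts the iteration: it precomputes the list of column indices the mask leaves
-- uncovered and counts rows by indexing only those columns, instead of A's per-cell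
-- scan with a boolean flag and early break (objective: alternative).

-- ===== PORT A =====
-- inner loop of A: isAllZeros after scanning `row` from index i, with early break
def pvAAllZeros (mask : Int) : List Int → Nat → Bool
  | [], _ => true
  | cell :: rest, i =>
    if cell = 1 ∧ Int.land (Int.shiftRight mask i) 1 = 0 then false
    else pvAAllZeros mask rest (i + 1)

def getAllZerosRowCount_py (matrix : List (List Int)) (mask : Int) : Int :=
  matrix.foldl (fun count row => if pvAAllZeros mask row 0 then count + 1 else count) 0

-- ===== PORT B =====
-- width = max(map(len, matrix), default=0)
def pvBWidth (matrix : List (List Int)) : Nat :=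
  matrix.foldl (fun w row => max w row.length) 0

-- uncovered = [j for j in range(width) if not (mask >> j) & 1]
def pvBUncovered (mask : Int) (width : Nat) : List Nat :=
  (List.range width).filter (fun j => decide (Int.land (Int.shiftRight mask j) 1 = 0))

def getAllZerosRowCount_py_alt (matrix : List (List Int)) (mask : Int) : Int :=
  let uncovered := pvBUncovered mask (pvBWidth matrix)
  matrix.foldl
    (fun c row =>
      c + (if uncovered.all (fun j => decide (row.length ≤ j) || decide (row.getD j 0 ≠ 1)) then 1 else 0))
    0

-- ===== PRECONDITION & SPEC =====
def Spec_getAllZerosRowCount_py (matrix : List (List Int)) (mask : Int) (out : Int) : Prop := out = getAllZerosRowCount_py_alt matrix mask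
instance (matrix : List (List Int)) (mask : Int) (out : Int) : Decidable (Spec_getAllZerosRowCount_py matrix mask out) := by unfold Spec_getAllZerosRowCount_py; infer_instance

-- ===== CLAIM (what is proved, stated in full; the proofs are below) =====
def Claim_equal_getAllZerosRowCount_py : Prop := ∀ (matrix : List (List Int)) (mask : Int), Dom_getAllZerosRowCount_py matrix mask → Spec_getAllZerosRowCount_py matrix mask (getAllZerosRowCount_py matrix mask)

-- ===== LEMMAS AND PROOFS =====

-- characterization of A's early-break inner loop
theorem pvA_char (mask : Int) : ∀ (row : List Int) (i : Nat),
    pvAAllZeros mask row i = true ↔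
    ∀ k (h : k < row.length), ¬(row[k] = 1 ∧ Int.land (Int.shiftRight mask (i + k)) 1 = 0) := by
  intro row
  induction row with
  | nil => intro i; simp [pvAAllZeros]
  | cons cell rest ih =>
    intro i
    by_cases h0 : cell = 1 ∧ Int.land (Int.shiftRight mask i) 1 = 0
    · simp only [pvAAllZeros, if_pos h0]
      constructor
      · intro h; cases h
      · intro h
        exact absurd h0 (by simpa using h 0 (Nat.succ_pos _))
    · simp only [pvAAllZeros, if_neg h0, ih (i + 1)]
      constructor
      · intro h k hk
        cases k with
        | zero => simpa using h0
        | succ k =>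
          have := h k (Nat.lt_of_succ_lt_succ hk)
          simpa [Nat.add_assoc, Nat.add_comm 1 k] using this
      · intro h k hk
        have := h (k + 1) (Nat.succ_lt_succ hk)
        simpa [Nat.add_assoc, Nat.add_comm 1 k] using this

-- membership in the uncovered-column list
theorem pvB_mem_uncovered (mask : Int) (width j : Nat) :
    j ∈ pvBUncovered mask width ↔ j < width ∧ Int.land (Int.shiftRight mask j) 1 = 0 := by
  simp [pvBUncovered, List.mem_filter, List.mem_range]

-- every row's length is bounded by pvBWidth
theorem pv_foldl_max_ge_init : ∀ (l : List (List Int)) (a : Nat),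
    a ≤ l.foldl (fun w r => max w r.length) a := by
  intro l
  induction l with
  | nil => intro a; exact Nat.le_refl _
  | cons r rest ih => intro a; exact Nat.le_trans (Nat.le_max_left _ _) (ih _)

theorem pvBWidth_foldl_le (row : List Int) : ∀ (l : List (List Int)) (a : Nat), row ∈ l →
    row.length ≤ l.foldl (fun w r => max w r.length) a := by
  intro l
  induction l with
  | nil => intro a h; cases h
  | cons r rest ih =>
    intro a h
    rcases List.mem_cons.mp h with rfl | hmem
    · exact Nat.le_trans (Nat.le_max_right a _) (pv_foldl_max_ge_init rest _)
    · exact ih _ hmem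

-- per-row equivalence, given the row fits inside the width
theorem pv_row_eq (mask : Int) (row : List Int) (width : Nat) (hw : row.length ≤ width) :
    pvAAllZeros mask row 0 =
    (pvBUncovered mask width).all (fun j => decide (row.length ≤ j) || decide (row.getD j 0 ≠ 1)) := by
  rcases Bool.eq_false_or_eq_true ((pvBUncovered mask width).all
      (fun j => decide (row.length ≤ j) || decide (row.getD j 0 ≠ 1))) with hb | hb
  case inl =>
    rw [hb]; rw [List.all_eq_true] at hb
    rw [pvA_char]
    intro k hk ⟨hk1, hkc⟩
    have hmem : k ∈ pvBUncovered mask width :=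
      (pvB_mem_uncovered mask width k).mpr ⟨Nat.lt_of_lt_of_le hk hw, by simpa using hkc⟩
    have := hb k hmem
    simp only [Bool.or_eq_true, decide_eq_true_eq] at this
    rcases this with h | h
    · exact absurd hk (Nat.not_lt_of_le h)
    · exact h (by rw [List.getD_eq_getElem row 0 hk]; exact hk1)
  case inr =>
    rw [hb]; rw [List.all_eq_false] at hb
    obtain ⟨j, hjmem, hjp⟩ := hb
    obtain ⟨hjw, hjc⟩ := (pvB_mem_uncovered mask width j).mp hjmem
    simp only [Bool.or_eq_true, decide_eq_true_eq] at hjp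
    push Not at hjp
    have hjlen : j < row.length := hjp.1
    have hjval : row.getD j 0 = 1 := hjp.2
    by_contra hA
    rw [Bool.not_eq_false] at hA
    have := (pvA_char mask row 0).mp hA j hjlen
    exact this ⟨by rw [← List.getD_eq_getElem row 0 hjlen]; exact hjval, by simpa using hjc⟩

-- fold equivalence over the rows
theorem pv_fold_eq (mask : Int) (width : Nat) :
    ∀ (l : List (List Int)) (c : Int), (∀ row ∈ l, row.length ≤ width) →
    l.foldl (fun count row => if pvAAllZeros mask row 0 then count + 1 else count) c =
    l.foldl (fun c row =>
      c + (if (pvBUncovered mask width).all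
            (fun j => decide (row.length ≤ j) || decide (row.getD j 0 ≠ 1)) then 1 else 0)) c := by
  intro l
  induction l with
  | nil => intro c _; rfl
  | cons row rest ih =>
    intro c h
    simp only [List.foldl]
    rw [pv_row_eq mask row width (h row (List.mem_cons_self))]
    have hrest := fun r hr => h r (List.mem_cons_of_mem _ hr)
    split_ifs with hcond
    · exact ih _ hrest
    · rw [Int.add_zero]; exact ih _ hrest

-- ===== VERDICT (by name: the statement is the Claim_ definition above) =====
theorem getAllZerosRowCount_py_spec : Claim_equal_getAllZerosRowCount_py := by
  intro matrix mask _
  unfold Spec_getAllZerosRowCount_py getAllZerosRowCount_py getAllZerosRowCount_py_alt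
  exact pv_fold_eq mask (pvBWidth matrix) matrix 0
    (fun row hr => pvBWidth_foldl_le row matrix 0 hr)
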